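-- pv_equiv track=rewrite | github.com/rasureganesh/sorting_assignment | 12_Buy two chocolates.py | leftoverMoney
-- ===== SOURCE A (Python) =====
-- def leftoverMoney(prices, money):
--     prices.sort()
--
--     left = 0
--     right = len(prices) - 1
--     min_leftover = money
--
--     while left < right:
--         current_sum = prices[left] + prices[right]
--
--         if current_sum <= money:
--             min_leftover = min(min_leftover, money - current_sum)
--             left += 1
--         else:
--             right -= 1
--
--     if min_leftover == money:
--         return money
--     return min_leftover
-- ===== SOURCE B (Python) =====
-- def leftoverMoney(prices, money):
--     # Brute-force scan over all unordered pairs, no sorting.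
--     # (Return-value equivalent to A; unlike A it does not sort `prices` in place.)
--     acc = money
--     rest = prices
--     while rest:
--         x = rest[0]
--         rest = rest[1:]
--         for y in rest:
--             s = x + y
--             if s <= money:
--                 acc = min(acc, money - s)
--     return acc
-- ===== Notes on version B (the rewrite author's own statement) =====
-- stated objective: alternative
-- what changed: Replaces A's sort-then-two-pointer sweep with a direct suffix-by-suffix scan of all pairs that needs no sorting; equivalence is about the return value only (A sorts the input list in place, B leaves it untouched).
import Mathlib
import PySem

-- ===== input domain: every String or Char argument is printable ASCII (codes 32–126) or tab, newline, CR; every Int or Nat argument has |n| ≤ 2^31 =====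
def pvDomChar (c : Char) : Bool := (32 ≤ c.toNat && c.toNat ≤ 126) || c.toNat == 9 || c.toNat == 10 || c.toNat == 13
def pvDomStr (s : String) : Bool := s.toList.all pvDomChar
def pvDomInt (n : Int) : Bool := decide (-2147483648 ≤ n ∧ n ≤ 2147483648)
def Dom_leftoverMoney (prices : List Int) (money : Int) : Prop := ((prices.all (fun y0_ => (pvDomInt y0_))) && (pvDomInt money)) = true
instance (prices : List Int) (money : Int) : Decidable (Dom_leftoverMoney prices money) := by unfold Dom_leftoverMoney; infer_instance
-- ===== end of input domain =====

-- B replaces A's sort + two-pointer sweep with a sort-free brute-force scan over all pairs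
-- (return-value equivalence only: A sorts `prices` in place, B does not mutate it).


-- ===== PORT A =====
-- the `while left < right` loop; the loop only reads prices[left]/prices[right] with
-- 0 ≤ left < right < len, where pyGetD with default 0 is exact
def pvLoopA (l : List Int) (money : Int) (left right acc : Int) : Int :=
  if _h : left < right then
    let s := PySem.List.pyGetD l left 0 + PySem.List.pyGetD l right 0
    if s ≤ money then pvLoopA l money (left + 1) right (min acc (money - s))
    else pvLoopA l money left (right - 1) acc
  else acc
termination_by (right - left).toNat
decreasing_by all_goals omega

def leftoverMoney (prices : List Int) (money : Int) : Int :=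
  let l := PySem.List.sorted prices (fun x => x) false   -- prices.sort()
  let r := pvLoopA l money 0 ((l.length : Int) - 1) money
  if r = money then money else r

-- ===== PORT B =====
-- the `while rest:` loop of Source B: peel the head, scan it against the remaining suffix
def pvBestB (money : Int) : List Int → Int → Int
  | [], acc => acc
  | x :: rest, acc =>
      pvBestB money rest
        (rest.foldl (fun a y => if x + y ≤ money then min a (money - (x + y)) else a) acc)

def leftoverMoney_alt (prices : List Int) (money : Int) : Int :=
  pvBestB money prices money

-- ===== PRECONDITION & SPEC =====
def Spec_leftoverMoney (prices : List Int) (money : Int) (out : Int) : Prop := out = leftoverMoney_alt prices money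
instance (prices : List Int) (money : Int) (out : Int) : Decidable (Spec_leftoverMoney prices money out) := by unfold Spec_leftoverMoney; infer_instance

-- ===== CLAIM (what is proved, stated in full; the proofs are below) =====
def Claim_equal_leftoverMoney : Prop := ∀ (prices : List Int) (money : Int), Dom_leftoverMoney prices money → Spec_leftoverMoney prices money (leftoverMoney prices money)

-- ===== LEMMAS AND PROOFS =====

-- All sums of unordered pairs of a list (head paired with each later element, then recurse).
def pvPairSums : List Int → List Int
  | [] => []
  | x :: rest => rest.map (fun y => x + y) ++ pvPairSums rest

-- the common fold both programs compute: running min of (money - s) over the valid pair sums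
def pvG (money : Int) : Int → Int → Int := fun a s => min a (money - s)

theorem pvG_rcomm (money : Int) : RightCommutative (pvG money) :=
  ⟨fun b a a' => by simp only [pvG]; omega⟩

-- B's port is the pvG-fold over the valid pair sums
theorem pvBestB_eq (money : Int) (l : List Int) (acc : Int) :
    pvBestB money l acc =
      ((pvPairSums l).filter (fun s => s ≤ money)).foldl (pvG money) acc := by
  induction l generalizing acc with
  | nil => rfl
  | cons x rest ih =>
    simp only [pvBestB, pvPairSums, List.filter_append, List.foldl_append, ih]
    congr 1
    rw [List.foldl_filter, List.foldl_map]
    simp [pvG]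

-- pvPairSums is permutation-stable
theorem pvPairSums_perm {l l' : List Int} (h : l.Perm l') :
    (pvPairSums l).Perm (pvPairSums l') := by
  induction h with
  | nil => exact List.Perm.refl _
  | cons x h ih => exact (h.map _).append ih
  | swap x y t =>
    simp only [pvPairSums, List.map_cons]
    rw [show y + x = x + y by omega]
    refine List.Perm.cons _ ?_
    simpa [List.append_assoc] using
      (List.perm_append_comm (l₁ := t.map fun z => y + z)
        (l₂ := t.map fun z => x + z)).append_right (pvPairSums t)
  | trans _ _ ih1 ih2 => exact ih1.trans ih2

-- appending one element adds its pairs (up to permutation)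
theorem pvPairSums_append_singleton (w : List Int) (z : Int) :
    (pvPairSums (w ++ [z])).Perm (pvPairSums w ++ w.map (fun v => v + z)) := by
  induction w with
  | nil => simp [pvPairSums]
  | cons x w ih =>
    simp only [List.cons_append, pvPairSums, List.map_append, List.map_cons, List.map_nil]
    refine (List.Perm.append_left _ ih).trans ?_
    have h := (List.perm_middle (a := x + z) (l₁ := pvPairSums w)
      (l₂ := w.map (fun v => v + z))).symm
    simpa [List.append_assoc] using h.append_left (w.map (fun y => x + y))

-- folding pvG = taking the min with (money - max of the list)
theorem pvFold_g_max (money : Int) (sums : List Int) (acc : Int) :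
    sums.foldl (pvG money) acc =
      (match sums.max? with | none => acc | some m => min acc (money - m)) := by
  induction sums generalizing acc with
  | nil => rfl
  | cons u rest ih =>
    rw [List.foldl_cons, ih, List.max?_cons]
    cases h : rest.max? with
    | none => simp [pvG]
    | some m => simp only [Option.elim_some, pvG]; omega

-- in a ≤-sorted nonempty list the last element is the max
theorem pvMax?_eq_getLast : ∀ {w : List Int}, w.Pairwise (· ≤ ·) → (hne : w ≠ []) →
    w.max? = some (w.getLast hne)
  | [x], _, _ => by simp
  | x :: y :: t, h, _ => by
    have ht : (y :: t).Pairwise (· ≤ ·) := h.tail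
    have ih := pvMax?_eq_getLast ht (by simp : (y :: t) ≠ [])
    rw [List.max?_cons, ih]
    simp only [Option.elim_some, List.getLast_cons (by simp : (y :: t) ≠ [])]
    congr 1
    have hx : x ≤ (y :: t).getLast (by simp) := by
      rcases h with _ | ⟨hx, _⟩
      exact hx _ (List.getLast_mem _)
    omega

theorem pvLe_getLast : ∀ {w : List Int}, w.Pairwise (· ≤ ·) → (hne : w ≠ []) →
    ∀ v ∈ w, v ≤ w.getLast hne
  | [_], _, _ => by simp
  | x :: y :: t, h, _ => by
    intro v hv
    rw [List.getLast_cons (by simp : (y :: t) ≠ [])]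
    rcases List.mem_cons.mp hv with rfl | hv
    · rcases h with _ | ⟨hx, _⟩
      exact hx _ (List.getLast_mem _)
    · exact pvLe_getLast h.tail (by simp) v hv

-- list-level two-pointer sweep (proof helper mirroring pvLoopA on the explicit window)
def pvTwoPtr (money : Int) : List Int → Int → Int
  | [], acc => acc
  | [_], acc => acc
  | x :: y :: t, acc =>
      if x + (y :: t).getLast (by simp) ≤ money then
        pvTwoPtr money (y :: t) (min acc (money - (x + (y :: t).getLast (by simp))))
      else pvTwoPtr money (x :: (y :: t).dropLast) acc
termination_by w => w.length
decreasing_by all_goals simp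

-- two-pointer on a sorted window computes the pvG-fold over its valid pair sums
theorem pvTwoPtr_eq (money : Int) : ∀ (w : List Int), w.Pairwise (· ≤ ·) → ∀ (acc : Int),
    pvTwoPtr money w acc = ((pvPairSums w).filter (fun s => s ≤ money)).foldl (pvG money) acc
  | [], _, acc => by simp [pvTwoPtr, pvPairSums]
  | [x], _, acc => by simp [pvTwoPtr, pvPairSums]
  | x :: y :: t, h, acc => by
    have ht : (y :: t).Pairwise (· ≤ ·) := h.tail
    have hxall : ∀ v ∈ y :: t, x ≤ v := by
      rcases h with _ | ⟨hx, _⟩; exact hx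
    have hzmax := pvLe_getLast ht (by simp : (y :: t) ≠ [])
    have hpair : pvPairSums (x :: y :: t)
        = (y :: t).map (fun v => x + v) ++ pvPairSums (y :: t) := rfl
    by_cases hc : x + (y :: t).getLast (by simp) ≤ money
    · rw [pvTwoPtr, if_pos hc, pvTwoPtr_eq money (y :: t) ht]
      have hfs : ((y :: t).map (fun v => x + v)).filter (fun s => s ≤ money)
          = (y :: t).map (fun v => x + v) := by
        rw [List.filter_eq_self]
        intro a ha
        rcases List.mem_map.mp ha with ⟨v, hv, rfl⟩
        have := hzmax v hv
        simpa using by omega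
      have hsorted : ((y :: t).map (fun v => x + v)).Pairwise (· ≤ ·) := by
        rw [List.pairwise_map]
        exact ht.imp (by omega)
      have hmax : ((y :: t).map (fun v => x + v)).max?
          = some (x + (y :: t).getLast (by simp)) := by
        rw [pvMax?_eq_getLast hsorted (by simp), List.getLast_map]
      have hfold : ((y :: t).map (fun v => x + v)).foldl (pvG money) acc
          = min acc (money - (x + (y :: t).getLast (by simp))) := by
        rw [pvFold_g_max, hmax]
      rw [hpair, List.filter_append, List.foldl_append, hfs, hfold]
    · rw [pvTwoPtr, if_neg hc]
      have hsub : (x :: (y :: t).dropLast).Pairwise (· ≤ ·) :=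
        h.sublist ((List.dropLast_sublist _).cons₂ x)
      rw [pvTwoPtr_eq money _ hsub]
      have hsplit : x :: y :: t
          = (x :: (y :: t).dropLast) ++ [(y :: t).getLast (by simp)] := by
        simp [List.dropLast_append_getLast]
      have hperm := pvPairSums_append_singleton (x :: (y :: t).dropLast)
        ((y :: t).getLast (by simp))
      have hnil : ((x :: (y :: t).dropLast).map
            (fun v => v + (y :: t).getLast (by simp))).filter (fun s => s ≤ money) = [] := by
        rw [List.filter_eq_nil_iff]
        intro a ha
        rcases List.mem_map.mp ha with ⟨v, hv, rfl⟩
        have hxv : x ≤ v := by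
          rcases List.mem_cons.mp hv with rfl | hv
          · exact le_refl _
          · exact hxall v ((List.dropLast_sublist _).mem hv)
        simpa using by omega
      symm
      calc ((pvPairSums (x :: y :: t)).filter (fun s => s ≤ money)).foldl (pvG money) acc
          = ((pvPairSums ((x :: (y :: t).dropLast)
              ++ [(y :: t).getLast (by simp)])).filter
              (fun s => s ≤ money)).foldl (pvG money) acc := by rw [← hsplit]
        _ = ((pvPairSums (x :: (y :: t).dropLast) ++ (x :: (y :: t).dropLast).map
              (fun v => v + (y :: t).getLast (by simp))).filter
              (fun s => s ≤ money)).foldl (pvG money) acc :=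
            List.Perm.foldl_eq (rcomm := pvG_rcomm money) (hperm.filter _) acc
        _ = ((pvPairSums (x :: (y :: t).dropLast)).filter (fun s => s ≤ money)).foldl
              (pvG money) acc := by
            rw [List.filter_append, hnil, List.append_nil]
termination_by w => w.length
decreasing_by all_goals simp

-- the index loop equals the two-pointer sweep on the explicit window
theorem pvLoopA_eq_twoPtr (l : List Int) (money : Int) : ∀ (n a b : Nat), b - a = n →
    b < l.length → ∀ (acc : Int),
    pvLoopA l money (a : Int) (b : Int) acc =
      pvTwoPtr money ((l.drop a).take (b + 1 - a)) acc := by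
  intro n
  induction n using Nat.strong_induction_on with
  | _ n ih =>
    intro a b hn hb acc
    rw [pvLoopA]
    by_cases hab : a < b
    · have hlt : (a : Int) < (b : Int) := by exact_mod_cast hab
      have hal : a < l.length := lt_trans hab hb
      rw [dif_pos hlt]
      have hget_a : PySem.List.pyGetD l (a : Int) 0 = l[a] := by
        rw [PySem.List.pyGetD_natCast, List.getD_eq_getElem]
      have hget_b : PySem.List.pyGetD l (b : Int) 0 = l[b] := by
        rw [PySem.List.pyGetD_natCast, List.getD_eq_getElem]
      have hwin : (l.drop a).take (b + 1 - a)
          = l[a] :: (l.drop (a + 1)).take (b - a) := by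
        rw [List.drop_eq_getElem_cons hal, show b + 1 - a = (b - a) + 1 by omega,
          List.take_succ_cons]
      have hlen2 : ((l.drop (a + 1)).take (b - a)).length = b - a := by
        simp only [List.length_take, List.length_drop]
        omega
      obtain ⟨y, t, hyt⟩ : ∃ y t, (l.drop (a + 1)).take (b - a) = y :: t := by
        refine List.exists_cons_of_ne_nil ?_
        intro h0
        rw [h0] at hlen2
        simp at hlen2
        omega
      have hlen3 : (y :: t).length = b - a := by rw [← hyt]; exact hlen2
      have hlast : (y :: t).getLast (by simp) = l[b] := by
        rw [List.getLast_eq_getElem, List.getElem_of_eq hyt.symm,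
          List.getElem_take, List.getElem_drop]
        simp_rw [hlen3]
        have hidx : a + 1 + (b - a - 1) = b := by omega
        simp_rw [hidx]
      rw [hwin, hyt, hget_a, hget_b]
      by_cases hs : l[a] + l[b] ≤ money
      · rw [if_pos hs, pvTwoPtr, if_pos (by rw [hlast]; exact hs)]
        have hcast : (a : Int) + 1 = ((a + 1 : Nat) : Int) := by push_cast; ring
        rw [hcast, ih (b - (a + 1)) (by omega) (a + 1) b rfl hb, hlast]
        rw [show b + 1 - (a + 1) = b - a by omega, hyt]
      · rw [if_neg hs, pvTwoPtr, if_neg (by rw [hlast]; exact hs)]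
        have hcast : (b : Int) - 1 = ((b - 1 : Nat) : Int) := by omega
        rw [hcast, ih ((b - 1) - a) (by omega) a (b - 1) rfl (by omega) acc]
        congr 1
        -- take (b - a) (drop a) = l[a] :: (y :: t).dropLast
        have hdl : ((l.drop a).take (b + 1 - a)).dropLast = (l.drop a).take (b - a) := by
          rw [List.dropLast_eq_take, List.take_take, List.length_take, List.length_drop]
          congr 1
          omega
        rw [show (b - 1) + 1 - a = b - a by omega, ← hdl, hwin, hyt,
          List.dropLast_cons₂]
    · have hnlt : ¬ ((a : Int) < (b : Int)) := by exact_mod_cast hab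
      rw [dif_neg hnlt]
      have hlen : ((l.drop a).take (b + 1 - a)).length ≤ 1 := by
        simp only [List.length_take, List.length_drop]
        omega
      cases hw : (l.drop a).take (b + 1 - a) with
      | nil => rw [pvTwoPtr]
      | cons u w2 =>
        cases w2 with
        | nil => rw [pvTwoPtr]
        | cons v w3 =>
          rw [hw] at hlen
          simp at hlen

-- ===== VERDICT (by name: the statement is the Claim_ definition above) =====
theorem leftoverMoney_spec : Claim_equal_leftoverMoney := by
  intro prices money _
  show leftoverMoney prices money = leftoverMoney_alt prices money
  have hperm := PySem.List.sorted_perm prices (fun x => x) false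
  have hpw : (PySem.List.sorted prices (fun x => x) false).Pairwise (· ≤ ·) :=
    PySem.List.sorted_pairwise prices (fun x => x)
  set l := PySem.List.sorted prices (fun x => x) false with hl
  have hkey : pvLoopA l money 0 ((l.length : Int) - 1) money
      = leftoverMoney_alt prices money := by
    by_cases hnil : l = []
    · have hp : prices = [] := by rw [hnil] at hperm; exact hperm.symm.eq_nil
      rw [hnil, hp]
      rw [pvLoopA]
      norm_num
      rfl
    · have h1 : 1 ≤ l.length := by
        exact List.length_pos_of_ne_nil hnil
      have hcast : ((l.length : Int) - 1) = ((l.length - 1 : Nat) : Int) := by omega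
      rw [show (0 : Int) = ((0 : Nat) : Int) by rfl, hcast,
        pvLoopA_eq_twoPtr l money ((l.length - 1) - 0) 0 (l.length - 1) rfl (by omega) money]
      rw [show l.length - 1 + 1 - 0 = l.length by omega, List.drop_zero, List.take_length]
      rw [pvTwoPtr_eq money l hpw money]
      rw [List.Perm.foldl_eq (rcomm := pvG_rcomm money)
        (((pvPairSums_perm hperm).filter _)) money]
      rw [leftoverMoney_alt, pvBestB_eq]
  rw [leftoverMoney, ← hl, hkey]
  by_cases hr : leftoverMoney_alt prices money = money
  · rw [if_pos hr, hr]
  · rw [if_neg hr]
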